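-- pv_equiv track=rewrite | github.com/Lab25A-CS/Appunti-Triennale | SecondoAnno/ASD/Modulo1/Algoritmi/Esercitazioni/strisciaDiMezzo.py | contaSinistra
-- ===== SOURCE A (Python) =====
-- def contaSinistra(L):
--     n = len(L) - 1
--     i, t = n, 0
--     B = [0]*len(L)
--
--     while i >= 0:
--         if L[i] < 0:
--             break
--         B[i] = None
--         i -= 1
--
--     while i >= 0:
--         if L[i] < 0:
--             t = 0
--
--         else:
--             t += L[i]
--
--         B[i] = t
--         i -= 1
--
--     return B
-- ===== SOURCE B (Python) =====
-- def contaSinistra(L):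
--     # prefix sums, then one backward pass tracking the next negative index
--     P = [0]
--     for x in L:
--         P.append(P[-1] + x)
--     res = [None] * len(L)
--     m = None
--     for i in range(len(L) - 1, -1, -1):
--         if L[i] < 0:
--             m = i
--         if m is not None:
--             res[i] = P[m] - P[i]
--     return res
-- ===== Notes on version B (the rewrite author's own statement) =====
-- stated objective: alternative
-- what changed: A scans right-to-left with a running accumulator that resets at negatives (two while-loops over a mutable index); B first builds the prefix-sum array in one forward pass and then, in a single backward pass tracking the index of the next negative, emits each answer as a prefix-sum difference P[m]-P[i] (None when no negative follows).
import Mathlib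
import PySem

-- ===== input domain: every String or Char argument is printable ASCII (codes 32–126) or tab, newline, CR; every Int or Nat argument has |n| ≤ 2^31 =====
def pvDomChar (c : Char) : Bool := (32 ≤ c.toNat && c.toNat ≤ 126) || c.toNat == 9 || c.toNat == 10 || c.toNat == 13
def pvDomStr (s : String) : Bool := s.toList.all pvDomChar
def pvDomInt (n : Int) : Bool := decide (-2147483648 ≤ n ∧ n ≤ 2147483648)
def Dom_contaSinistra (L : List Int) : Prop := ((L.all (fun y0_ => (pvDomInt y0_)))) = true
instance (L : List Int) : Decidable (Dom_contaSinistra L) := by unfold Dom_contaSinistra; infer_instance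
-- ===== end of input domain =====

-- B replaces A's resetting right-to-left accumulator by prefix sums plus a backward
-- next-negative scan emitting prefix-sum differences; alternative decomposition, same O(n) cost.

-- ===== PORT A =====
-- first while loop: i counts down from n-1, breaks at the first negative; B[i] := None
def pvLoopA1 (L : List Int) : List (Option Int) → Nat → List (Option Int) × Nat
  | B, 0 => (B, 0)
  | B, j+1 => if L.getD j 0 < 0 then (B, j+1) else pvLoopA1 L (B.set j none) j

-- second while loop: t resets at negatives, else accumulates; B[i] := t
def pvLoopA2 (L : List Int) : List (Option Int) → Int → Nat → List (Option Int)
  | B, _, 0 => B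
  | B, t, j+1 =>
      let t' := if L.getD j 0 < 0 then 0 else t + L.getD j 0
      pvLoopA2 L (B.set j (some t')) t' j

def contaSinistra (L : List Int) : List (Option Int) :=
  let B := List.replicate L.length (some (0:Int))
  let r := pvLoopA1 L B L.length
  pvLoopA2 L r.1 0 r.2

-- ===== PORT B =====
-- P = prefix sums, built by one forward pass (P.append(P[-1] + x))
def pvMkP (L : List Int) : List Int := L.foldl (fun P x => P ++ [P.getLastD 0 + x]) [0]

-- backward pass: m = index of next negative (None if none); res[i] = P[m] - P[i]
def pvLoopB (L P : List Int) : List (Option Int) → Option Nat → Nat → List (Option Int)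
  | acc, _, 0 => acc
  | acc, m, j+1 =>
      let m' := if L.getD j 0 < 0 then some j else m
      let v : Option Int := m'.map (fun mm => P.getD mm 0 - P.getD j 0)
      pvLoopB L P (v :: acc) m' j

def contaSinistra_alt (L : List Int) : List (Option Int) :=
  pvLoopB L (pvMkP L) [] none L.length

-- ===== PRECONDITION & SPEC =====
def Spec_contaSinistra (L : List Int) (out : List (Option Int)) : Prop := out = contaSinistra_alt L
instance (L : List Int) (out : List (Option Int)) : Decidable (Spec_contaSinistra L out) := by unfold Spec_contaSinistra; infer_instance

-- ===== CLAIM (what is proved, stated in full; the proofs are below) =====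
def Claim_equal_contaSinistra : Prop := ∀ (L : List Int), Dom_contaSinistra L → Spec_contaSinistra L (contaSinistra L)

-- ===== LEMMAS AND PROOFS =====

-- index of the first negative at or after k (none if no negative in L[k..])
def pvNN (L : List Int) (k : Nat) : Option Nat :=
  if h : k < L.length then (if L.getD k 0 < 0 then some k else pvNN L (k+1)) else none
termination_by L.length - k

-- the common value of both programs at index k
def pvOutF (L : List Int) (k : Nat) : Option Int :=
  (pvNN L k).map (fun M => (L.take M).sum - (L.take k).sum)

lemma pvNN_spec (L : List Int) (k : Nat) {M : Nat} (h : pvNN L k = some M) :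
    k ≤ M ∧ M < L.length ∧ L.getD M 0 < 0 := by
  induction k using pvNN.induct L with
  | case1 k hk hneg =>
    rw [pvNN, dif_pos hk, if_pos hneg] at h
    obtain rfl : k = M := by simpa using h
    exact ⟨le_refl _, hk, hneg⟩
  | case2 k hk hneg ih =>
    rw [pvNN, dif_pos hk, if_neg hneg] at h
    obtain ⟨h1, h2, h3⟩ := ih h
    exact ⟨by omega, h2, h3⟩
  | case3 k hk => rw [pvNN, dif_neg hk] at h; simp at h

lemma pvNN_none_of_nonneg (L : List Int) (k : Nat)
    (h : ∀ m, k ≤ m → m < L.length → 0 ≤ L.getD m 0) : pvNN L k = none := by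
  induction k using pvNN.induct L with
  | case1 k hk hneg => exact absurd (h k le_rfl hk) (by omega)
  | case2 k hk hneg ih =>
    rw [pvNN, dif_pos hk, if_neg hneg]
    exact ih (fun m hm hm' => h m (by omega) hm')
  | case3 k hk => rw [pvNN, dif_neg hk]

lemma pvNN_some_of_neg (L : List Int) (k m : Nat)
    (hk : k ≤ m) (hm : m < L.length) (hneg : L.getD m 0 < 0) : pvNN L k ≠ none := by
  induction k using pvNN.induct L with
  | case1 k hk' hneg' => rw [pvNN, dif_pos hk', if_pos hneg']; simp
  | case2 k hk' hneg' ih =>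
    rw [pvNN, dif_pos hk', if_neg hneg']
    rcases Nat.eq_or_lt_of_le hk with rfl | h
    · exact absurd hneg (by omega)
    · exact ih (by omega)
  | case3 k hk' => omega

lemma take_succ_sum (L : List Int) (j : Nat) (hj : j < L.length) :
    (L.take (j+1)).sum = (L.take j).sum + L.getD j 0 := by
  rw [List.take_add_one, List.sum_append, List.getElem?_eq_getElem hj]
  simp [List.getD, List.getElem?_eq_getElem hj]

lemma pvMkP_eq (L : List Int) :
    pvMkP L = (List.range (L.length + 1)).map (fun k => (L.take k).sum) := by
  induction L using List.reverseRecOn with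
  | nil => simp [pvMkP]
  | append_singleton L x ih =>
    unfold pvMkP at *
    rw [List.foldl_append, ih]
    simp only [List.foldl_cons, List.foldl_nil]
    rw [List.length_append, List.length_singleton]
    rw [List.range_succ (n := L.length + 1), List.map_append]
    congr 1
    · apply List.map_congr_left
      intro k hk
      simp only [List.mem_range] at hk
      rw [List.take_append_of_le_length (by omega)]
    · simp only [List.map_cons, List.map_nil]
      congr 1
      have hlast : ((List.range (L.length + 1)).map (fun k => (L.take k).sum)).getLastD 0
          = (L.take L.length).sum := by
        rw [List.getLastD_eq_getLast?, List.getLast?_map]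
        rw [List.getLast?_range]
        simp
      rw [hlast]
      rw [List.take_of_length_le (by simp), List.take_of_length_le (by simp)]
      simp

lemma pvMkP_getD (L : List Int) (k : Nat) (hk : k ≤ L.length) :
    (pvMkP L).getD k 0 = (L.take k).sum := by
  rw [pvMkP_eq]
  rw [List.getD_eq_getElem?_getD, List.getElem?_map, List.getElem?_range (by omega)]
  rfl

lemma pvLoopB_eq (L : List Int) (j : Nat) (acc : List (Option Int)) (hj : j ≤ L.length) :
    pvLoopB L (pvMkP L) acc (pvNN L j) j = ((List.range j).map (pvOutF L)) ++ acc := by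
  induction j generalizing acc with
  | zero => simp [pvLoopB]
  | succ j ih =>
    rw [pvLoopB]
    have hm' : pvNN L j = (if L.getD j 0 < 0 then some j else pvNN L (j+1)) := by
      rw [pvNN, dif_pos (show j < L.length by omega)]
    rw [← hm']
    have hv : (pvNN L j).map (fun mm => (pvMkP L).getD mm 0 - (pvMkP L).getD j 0)
        = pvOutF L j := by
      unfold pvOutF
      cases h : pvNN L j with
      | none => simp
      | some M =>
        obtain ⟨h1, h2, h3⟩ := pvNN_spec L j h
        simp only [Option.map_some]
        rw [pvMkP_getD L M (by omega), pvMkP_getD L j (by omega)]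
    rw [hv, ih _ (by omega)]
    rw [List.range_succ, List.map_append]
    simp

lemma alt_eq (L : List Int) :
    contaSinistra_alt L = (List.range L.length).map (pvOutF L) := by
  unfold contaSinistra_alt
  have : (none : Option Nat) = pvNN L L.length := by rw [pvNN, dif_neg (by omega)]
  rw [this, pvLoopB_eq L L.length [] le_rfl, List.append_nil]

lemma pvLoopA1_spec (L : List Int) (j : Nat) (B : List (Option Int))
    (hj : j ≤ L.length) (hB : B.length = L.length) :
    (pvLoopA1 L B j).2 ≤ j ∧
    (∀ m, (pvLoopA1 L B j).2 ≤ m → m < j → 0 ≤ L.getD m 0) ∧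
    ((pvLoopA1 L B j).2 = 0 ∨ L.getD ((pvLoopA1 L B j).2 - 1) 0 < 0) ∧
    (pvLoopA1 L B j).1.length = L.length ∧
    (∀ k, (pvLoopA1 L B j).1[k]? =
      if (pvLoopA1 L B j).2 ≤ k ∧ k < j then some none else B[k]?) := by
  induction j generalizing B with
  | zero =>
    rw [pvLoopA1]
    refine ⟨le_rfl, by omega, Or.inl rfl, hB, ?_⟩
    intro k; rw [if_neg (by omega)]
  | succ j ih =>
    rw [pvLoopA1]
    by_cases hneg : L.getD j 0 < 0
    · rw [if_pos hneg]
      refine ⟨le_rfl, by omega, Or.inr (by simpa using hneg), hB, ?_⟩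
      intro k; rw [if_neg (by omega)]
    · rw [if_neg hneg]
      obtain ⟨h1, h2, h3, h4, h5⟩ := ih (B.set j none) (by omega) (by simpa using hB)
      refine ⟨by omega, ?_, h3, h4, ?_⟩
      · intro m hm hm'
        rcases Nat.lt_or_ge m j with h | h
        · exact h2 m hm h
        · have : m = j := by omega
          subst this; omega
      · intro k
        rw [h5 k]
        by_cases hk : (pvLoopA1 L (B.set j none) j).2 ≤ k ∧ k < j
        · rw [if_pos hk, if_pos ⟨hk.1, by omega⟩]
        · rw [if_neg hk]
          by_cases hkj : k = j
          · subst hkj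
            rw [if_pos ⟨by omega, by omega⟩, List.getElem?_set_self (by omega)]
          · rw [List.getElem?_set_ne (by omega)]
            rw [if_neg (by omega)]

lemma pvLoopA2_spec (L : List Int) (j : Nat) (B : List (Option Int)) (t : Int)
    (hj : j ≤ L.length) (hB : B.length = L.length)
    (hT : ∀ M, pvNN L j = some M → t = (L.take M).sum - (L.take j).sum)
    (hneg : ∀ k, k < j → pvNN L k ≠ none) :
    (pvLoopA2 L B t j).length = L.length ∧
    (∀ k, (pvLoopA2 L B t j)[k]? = if k < j then some (pvOutF L k) else B[k]?) := by
  induction j generalizing B t with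
  | zero =>
    rw [pvLoopA2]
    exact ⟨hB, fun k => by rw [if_neg (by omega)]⟩
  | succ j ih =>
    rw [pvLoopA2]
    have hnnj : pvNN L j = (if L.getD j 0 < 0 then some j else pvNN L (j+1)) := by
      rw [pvNN, dif_pos (show j < L.length by omega)]
    have ht' : ∀ M, pvNN L j = some M →
        (if L.getD j 0 < 0 then (0:Int) else t + L.getD j 0)
          = (L.take M).sum - (L.take j).sum := by
      intro M hM
      by_cases hneg' : L.getD j 0 < 0
      · rw [if_pos hneg']
        rw [hnnj, if_pos hneg'] at hM
        obtain rfl : j = M := by simpa using hM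
        ring
      · rw [if_neg hneg']
        rw [hnnj, if_neg hneg'] at hM
        rw [hT M hM, take_succ_sum L j (by omega)]
        ring
    obtain ⟨hM, hMeq⟩ : ∃ M, pvNN L j = some M := by
      cases h : pvNN L j with
      | none => exact absurd h (hneg j (by omega))
      | some M => exact ⟨M, rfl⟩
    obtain ⟨ih1, ih2⟩ := ih (B.set j (some (if L.getD j 0 < 0 then (0:Int) else t + L.getD j 0)))
      (if L.getD j 0 < 0 then (0:Int) else t + L.getD j 0)
      (by omega) (by simpa using hB) ht' (fun k hk => hneg k (by omega))
    refine ⟨ih1, ?_⟩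
    intro k
    rw [ih2 k]
    by_cases hk : k < j
    · rw [if_pos hk, if_pos (show k < j + 1 by omega)]
    · rw [if_neg hk]
      by_cases hkj : k = j
      · subst hkj
        have hval : pvOutF L k = some (if L.getD k 0 < 0 then (0:Int) else t + L.getD k 0) := by
          unfold pvOutF
          rw [hMeq, Option.map_some, ht' hM hMeq]
        rw [List.getElem?_set_self (show k < B.length by omega),
            if_pos (Nat.lt_succ_self k), hval]
      · rw [List.getElem?_set_ne (show j ≠ k by omega),
            if_neg (show ¬ k < j + 1 by omega)]

lemma a_eq (L : List Int) :
    contaSinistra L = (List.range L.length).map (pvOutF L) := by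
  unfold contaSinistra
  obtain ⟨h1, h2, h3, h4, h5⟩ :=
    pvLoopA1_spec L L.length (List.replicate L.length (some (0:Int))) le_rfl (by simp)
  set r := pvLoopA1 L (List.replicate L.length (some (0:Int))) L.length with hr
  have hnone : pvNN L r.2 = none :=
    pvNN_none_of_nonneg L r.2 (fun m hm hm' => h2 m hm hm')
  obtain ⟨g1, g2⟩ := pvLoopA2_spec L r.2 r.1 0 (by omega) h4
    (fun M hM => absurd hM (by rw [hnone]; simp))
    (by
      intro k hk
      rcases h3 with h3 | h3
      · omega
      · exact pvNN_some_of_neg L k (r.2 - 1) (by omega) (by omega) h3)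
  apply List.ext_getElem?
  intro k
  rw [g2 k, List.getElem?_map]
  by_cases hk : k < r.2
  · rw [if_pos hk, List.getElem?_range (by omega)]
    rfl
  · rw [if_neg hk, h5 k]
    by_cases hkn : k < L.length
    · rw [if_pos ⟨by omega, hkn⟩, List.getElem?_range hkn]
      have : pvNN L k = none :=
        pvNN_none_of_nonneg L k (fun m hm hm' => h2 m (by omega) hm')
      simp [pvOutF, this]
    · rw [if_neg (by omega), List.getElem?_eq_none (by simpa using (by omega : L.length ≤ k)),
          List.getElem?_eq_none (by simpa using (by omega : L.length ≤ k))]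
      simp


-- ===== VERDICT (by name: the statement is the Claim_ definition above) =====
theorem contaSinistra_spec : Claim_equal_contaSinistra := by
  intro L _
  unfold Spec_contaSinistra
  rw [a_eq, alt_eq]
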